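-- pv_equiv track=rewrite | github.com/LucasSilvaFerreira/bigwig_compressor | attenuate_rna_bigwig.py | select_chrom_sizes
-- ===== SOURCE A (Python) =====
-- def select_chrom_sizes(chrom_sizes: dict[str, int], chrom_arg: str | None) -> list[tuple[str, int]]:
--     if not chrom_arg:
--         return list(chrom_sizes.items())
--
--     selected: list[tuple[str, int]] = []
--     seen: set[str] = set()
--     for raw_chrom in chrom_arg.split(","):
--         chrom = raw_chrom.strip()
--         if not chrom:
--             continue
--         if chrom not in chrom_sizes:
--             raise SystemExit(f"Chromosome '{chrom}' was requested but is not present in the bigWig header.")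
--         if chrom in seen:
--             continue
--         selected.append((chrom, chrom_sizes[chrom]))
--         seen.add(chrom)
--
--     if not selected:
--         raise SystemExit("--chroms was provided but no valid chromosome names were found.")
--     return selected
-- ===== SOURCE B (Python) =====
-- def select_chrom_sizes(chrom_sizes: dict[str, int], chrom_arg: str | None) -> list[tuple[str, int]]:
--     if not chrom_arg:
--         return list(chrom_sizes.items())
--
--     names = [c.strip() for c in chrom_arg.split(",") if c.strip()]
--     for name in names:
--         if name not in chrom_sizes:
--             raise SystemExit(f"Chromosome '{name}' was requested but is not present in the bigWig header.")
--     unique = list(dict.fromkeys(names))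
--     if not unique:
--         raise SystemExit("--chroms was provided but no valid chromosome names were found.")
--     return [(c, chrom_sizes[c]) for c in unique]
-- ===== Notes on version B (the rewrite author's own statement) =====
-- stated objective: alternative
-- what changed: A's single fused loop carrying a selected-list and a seen-set is split into three independent passes: collect stripped non-empty names, validate each against chrom_sizes (same SystemExit on the first missing name), then order-preserving dedup via dict.fromkeys and a final comprehension that looks the sizes up.
import Mathlib
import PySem

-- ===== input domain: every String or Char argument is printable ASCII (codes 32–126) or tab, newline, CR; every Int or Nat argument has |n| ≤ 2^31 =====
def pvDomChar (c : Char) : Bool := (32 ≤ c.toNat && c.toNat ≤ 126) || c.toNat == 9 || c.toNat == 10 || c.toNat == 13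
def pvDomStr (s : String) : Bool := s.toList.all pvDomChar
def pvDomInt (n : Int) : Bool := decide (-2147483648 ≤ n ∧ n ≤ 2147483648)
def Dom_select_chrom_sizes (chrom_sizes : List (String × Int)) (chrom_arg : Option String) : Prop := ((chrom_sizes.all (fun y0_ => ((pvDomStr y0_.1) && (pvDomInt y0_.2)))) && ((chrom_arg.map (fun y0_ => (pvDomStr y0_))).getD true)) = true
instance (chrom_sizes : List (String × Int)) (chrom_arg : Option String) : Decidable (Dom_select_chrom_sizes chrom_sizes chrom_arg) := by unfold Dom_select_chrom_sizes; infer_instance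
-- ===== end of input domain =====

-- B replaces A's single fused loop (selected list + seen set) by three passes — collect names,
-- validate membership, order-preserving dedup then lookup — same results; objective: alternative.


-- ===== PORT A =====
-- A's fused loop over the raw comma pieces, carrying `selected` and the seen-set.
-- On the 'raise SystemExit' branch (a requested name missing from the dict) it returns []
-- as a dummy value: those inputs are excluded by Pre_select_chrom_sizes.
def selAloop (d : PySem.Dict String Int) :
    List String → List (String × Int) → PySem.Set String → List (String × Int)
  | [], selected, _ => selected
  | raw :: rest, selected, seen =>
    let chrom := PySem.Str.strip raw
    if chrom = "" then selAloop d rest selected seen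
    else if !(d.contains chrom) then []        -- raise SystemExit (excluded by Pre_)
    else if PySem.Set.contains seen chrom then selAloop d rest selected seen
    else selAloop d rest (selected ++ [(chrom, d.getD chrom 0)]) (PySem.Set.add seen chrom)

def select_chrom_sizes (chrom_sizes : List (String × Int)) (chrom_arg : Option String) : List (String × Int) :=
  match chrom_arg with
  | none => chrom_sizes
  | some s =>
    if s = "" then chrom_sizes                 -- 'if not chrom_arg' also fires on ""
    else
      let selected := selAloop (PySem.Dict.mk chrom_sizes)
        ((PySem.Str.split? s ",").getD []) [] PySem.Set.empty
      if selected = [] then [] else selected   -- empty: raise SystemExit (excluded by Pre_)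

-- ===== PORT B =====
def select_chrom_sizes_alt (chrom_sizes : List (String × Int)) (chrom_arg : Option String) : List (String × Int) :=
  match chrom_arg with
  | none => chrom_sizes
  | some s =>
    if s = "" then chrom_sizes
    else
      let d := PySem.Dict.mk chrom_sizes
      let names := (((PySem.Str.split? s ",").getD []).filter
        (fun c => !(PySem.Str.strip c == ""))).map PySem.Str.strip
      if names.any (fun n => !(d.contains n)) then []   -- raise SystemExit (excluded by Pre_)
      else
        let unique := PySem.List.dedup names
        if unique = [] then []                          -- raise SystemExit (excluded by Pre_)
        else unique.map (fun c => (c, d.getD c 0))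

-- ===== PRECONDITION & SPEC =====
-- Pre_ excludes exactly the inputs on which A raises SystemExit: a non-empty chrom_arg whose
-- stripped comma pieces contain a name missing from chrom_sizes, or contain no non-empty name.
def Pre_select_chrom_sizes (chrom_sizes : List (String × Int)) (chrom_arg : Option String) : Prop :=
  chrom_arg.getD "" = "" ∨
    ((∃ c ∈ (PySem.Str.split? (chrom_arg.getD "") ",").getD [], PySem.Str.strip c ≠ "") ∧
     ∀ c ∈ (PySem.Str.split? (chrom_arg.getD "") ",").getD [], PySem.Str.strip c ≠ "" →
       (PySem.Dict.mk chrom_sizes).contains (PySem.Str.strip c) = true)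
instance (chrom_sizes : List (String × Int)) (chrom_arg : Option String) : Decidable (Pre_select_chrom_sizes chrom_sizes chrom_arg) := by unfold Pre_select_chrom_sizes; infer_instance

def pvWitness_select_chrom_sizes : (List (String × Int)) × Option String :=
  ([("chr1", 1000), ("chr2", 500)], some " chr2 ,chr2,chr1")

def Spec_select_chrom_sizes (chrom_sizes : List (String × Int)) (chrom_arg : Option String) (out : List (String × Int)) : Prop := out = select_chrom_sizes_alt chrom_sizes chrom_arg
instance (chrom_sizes : List (String × Int)) (chrom_arg : Option String) (out : List (String × Int)) : Decidable (Spec_select_chrom_sizes chrom_sizes chrom_arg out) := by unfold Spec_select_chrom_sizes; infer_instance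

-- ===== CLAIM (what is proved, stated in full; the proofs are below) =====
def Claim_equal_select_chrom_sizes : Prop := ∀ (chrom_sizes : List (String × Int)) (chrom_arg : Option String), Dom_select_chrom_sizes chrom_sizes chrom_arg → Pre_select_chrom_sizes chrom_sizes chrom_arg → Spec_select_chrom_sizes chrom_sizes chrom_arg (select_chrom_sizes chrom_sizes chrom_arg)

-- ===== LEMMAS AND PROOFS =====

-- order-preserving dedup relative to an initial seen-set
def pdedup (seen : PySem.Set String) : List String → List String
  | [] => []
  | n :: rest =>
    if PySem.Set.contains seen n then pdedup seen rest
    else n :: pdedup (PySem.Set.add seen n) rest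

theorem append_pdedup_eq_update (names : List String) : ∀ (seen : PySem.Set String),
    seen ++ pdedup seen names = PySem.Set.update seen names := by
  induction names with
  | nil => intro seen; simp [pdedup, PySem.Set.update]
  | cons n rest ih =>
    intro seen
    by_cases hmem : n ∈ seen
    · simp [pdedup, hmem, PySem.Set.update_cons, ih]
    · have hstep := ih (PySem.Set.add seen n)
      rw [PySem.Set.add_of_not_mem hmem] at hstep
      simp only [pdedup, PySem.Set.update_cons,
        PySem.Set.add_of_not_mem hmem, PySem.Set.contains_eq_listContains]
      simp only [List.contains_eq_mem, hmem, decide_false, Bool.false_eq_true, if_false]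
      rw [← hstep]
      simp

theorem pdedup_empty_eq_dedup (names : List String) :
    pdedup PySem.Set.empty names = PySem.List.dedup names := by
  have := append_pdedup_eq_update names PySem.Set.empty
  simpa [PySem.Set.empty, PySem.Set.update_nil_left, PySem.List.dedup_eq_ofList] using this

theorem selAloop_eq (d : PySem.Dict String Int) (raws : List String)
    (h : ∀ raw ∈ raws, PySem.Str.strip raw ≠ "" → d.contains (PySem.Str.strip raw) = true) :
    ∀ (sel : List (String × Int)) (seen : PySem.Set String),
    selAloop d raws sel seen =
      sel ++ (pdedup seen ((raws.filter (fun c => !(PySem.Str.strip c == ""))).map PySem.Str.strip)).map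
        (fun c => (c, d.getD c 0)) := by
  induction raws with
  | nil => intro sel seen; simp [selAloop, pdedup]
  | cons raw rest ih =>
    intro sel seen
    have hrest : ∀ r ∈ rest, PySem.Str.strip r ≠ "" → d.contains (PySem.Str.strip r) = true :=
      fun r hr => h r (List.mem_cons_of_mem _ hr)
    by_cases he : PySem.Str.strip raw = ""
    · simp [selAloop, he, ih hrest]
    · have hcont : d.contains (PySem.Str.strip raw) = true := h raw (List.mem_cons_self) he
      by_cases hmem : PySem.Str.strip raw ∈ seen
      · simp [selAloop, he, hcont, pdedup, hmem, ih hrest]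
      · simp [selAloop, he, hcont, pdedup, hmem, ih hrest]

theorem names_all_contains (d : PySem.Dict String Int) (parts : List String)
    (h : ∀ c ∈ parts, PySem.Str.strip c ≠ "" → d.contains (PySem.Str.strip c) = true) :
    ((parts.filter (fun c => !(PySem.Str.strip c == ""))).map PySem.Str.strip).any
      (fun n => !(d.contains n)) = false := by
  simp only [List.any_eq_false, List.mem_map, List.mem_filter]
  rintro n ⟨c, ⟨hc, hne⟩, rfl⟩
  have : PySem.Str.strip c ≠ "" := by simpa using hne
  simp [h c hc this]

-- ===== VERDICT (by name: the statement is the Claim_ definition above) =====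
theorem select_chrom_sizes_spec : Claim_equal_select_chrom_sizes := by
  intro chrom_sizes chrom_arg _hdom hpre
  unfold Spec_select_chrom_sizes
  cases chrom_arg with
  | none => rfl
  | some s =>
    by_cases hs : s = ""
    · simp [select_chrom_sizes, select_chrom_sizes_alt, hs]
    · rcases hpre with hpre | ⟨⟨c, hc, hcne⟩, hall⟩
      · exact absurd (by simpa using hpre) hs
      simp only [Option.getD_some] at hc hall
      have hA : selAloop (PySem.Dict.mk chrom_sizes) ((PySem.Str.split? s ",").getD []) [] PySem.Set.empty =
          (PySem.List.dedup ((((PySem.Str.split? s ",").getD []).filter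
              (fun c => !(PySem.Str.strip c == ""))).map PySem.Str.strip)).map
            (fun c => (c, (PySem.Dict.mk chrom_sizes).getD c 0)) := by
        rw [selAloop_eq (PySem.Dict.mk chrom_sizes) _ hall, pdedup_empty_eq_dedup]
        simp
      have hmemnames : PySem.Str.strip c ∈ (((PySem.Str.split? s ",").getD []).filter
          (fun c => !(PySem.Str.strip c == ""))).map PySem.Str.strip :=
        List.mem_map_of_mem (List.mem_filter.mpr ⟨hc, by simpa using hcne⟩)
      have hdnil : PySem.List.dedup ((((PySem.Str.split? s ",").getD []).filter
          (fun c => !(PySem.Str.strip c == ""))).map PySem.Str.strip) ≠ [] := by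
        have hmemd : PySem.Str.strip c ∈ PySem.List.dedup ((((PySem.Str.split? s ",").getD []).filter
            (fun c => !(PySem.Str.strip c == ""))).map PySem.Str.strip) := by
          rw [PySem.List.dedup_eq_ofList]
          exact (PySem.Set.mem_ofList _ _).mpr hmemnames
        exact fun hnil => by rw [hnil] at hmemd; cases hmemd
      have hne : (PySem.List.dedup ((((PySem.Str.split? s ",").getD []).filter
            (fun c => !(PySem.Str.strip c == ""))).map PySem.Str.strip)).map
          (fun c => (c, (PySem.Dict.mk chrom_sizes).getD c 0)) ≠ [] := by
        simpa [List.map_eq_nil_iff] using hdnil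
      have hany := names_all_contains (PySem.Dict.mk chrom_sizes) ((PySem.Str.split? s ",").getD []) hall
      simp only [select_chrom_sizes, select_chrom_sizes_alt, if_neg hs]
      rw [hA, hany, if_neg hne]
      simp only [Bool.false_eq_true, if_false, if_neg hdnil]
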